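-- pv_equiv track=rewrite | github.com/Q-T-A/PokerProject | poker.py | suit
-- ===== SOURCE A (Python) =====
-- def suit(num):
--     count = 0
--     rv = "C"
--     while num > 13:
--         num = num - 13
--         count = count + 1
--     if count == 1:
--         rv = "D"
--     if count == 2:
--         rv = "H"
--     if count == 3:
--         rv = "S"
--     return rv
-- ===== SOURCE B (Python) =====
-- def suit(num):
--     return {1: "D", 2: "H", 3: "S"}.get((num - 1) // 13, "C")
-- ===== Notes on version B (the rewrite author's own statement) =====
-- stated objective: simpler
-- what changed: Replaces the subtract-13 while-loop and the chain of ifs with a single closed-form floor-division and a dictionary lookup with default 'C'.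
import Mathlib
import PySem

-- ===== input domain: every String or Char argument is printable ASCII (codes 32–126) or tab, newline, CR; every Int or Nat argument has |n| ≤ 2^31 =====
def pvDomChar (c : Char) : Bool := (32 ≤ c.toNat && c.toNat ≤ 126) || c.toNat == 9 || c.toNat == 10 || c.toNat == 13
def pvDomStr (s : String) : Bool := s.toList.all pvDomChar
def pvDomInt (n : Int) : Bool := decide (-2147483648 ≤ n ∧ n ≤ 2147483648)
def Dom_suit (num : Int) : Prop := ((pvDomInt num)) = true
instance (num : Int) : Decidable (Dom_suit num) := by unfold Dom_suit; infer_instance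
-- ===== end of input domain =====

-- B replaces A's subtract-13 while-loop and if-chain by one closed-form floor
-- division and a dictionary lookup with default "C" (simpler; no iteration).

-- ===== PORT A =====
-- the while-loop of A: 'while num > 13: num -= 13; count += 1', returning the final count
def suitLoop (num count : Int) : Int :=
  if num > 13 then suitLoop (num - 13) (count + 1) else count
termination_by num.toNat
decreasing_by simp_wf; omega

def suit (num : Int) : String :=
  let count := suitLoop num 0
  let rv := "C"
  let rv := if count = 1 then "D" else rv
  let rv := if count = 2 then "H" else rv
  let rv := if count = 3 then "S" else rv
  rv

-- ===== PORT B =====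
def suit_alt (num : Int) : String :=
  (PySem.Dict.ofList [((1 : Int), "D"), (2, "H"), (3, "S")]).getD
    (PySem.Int.floordiv (num - 1) 13) "C"

-- ===== PRECONDITION & SPEC =====
def Spec_suit (num : Int) (out : String) : Prop := out = suit_alt num
instance (num : Int) (out : String) : Decidable (Spec_suit num out) := by unfold Spec_suit; infer_instance

-- ===== CLAIM (what is proved, stated in full; the proofs are below) =====
def Claim_equal_suit : Prop := ∀ (num : Int), Dom_suit num → Spec_suit num (suit num)

-- ===== LEMMAS AND PROOFS =====
-- the loop count equals the closed-form floor division, shifted by the accumulator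
theorem suitLoop_eq (num count : Int) :
    suitLoop num count =
      count + (if num ≤ 13 then 0 else (num - 1) / 13) := by
  induction num, count using suitLoop.induct with
  | case1 num count h ih =>
    rw [suitLoop, if_pos h, ih]
    split_ifs <;> omega
  | case2 num count h =>
    rw [suitLoop, if_neg h, if_pos (by omega)]
    omega

-- for a given count value, the dictionary lookup agrees with A's if-chain
theorem dict_lookup_eq (q : Int) :
    (PySem.Dict.ofList [((1 : Int), "D"), (2, "H"), (3, "S")]).getD q "C" =
      (if q = 3 then "S" else if q = 2 then "H" else if q = 1 then "D" else "C") := by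
  rcases show q = 1 ∨ q = 2 ∨ q = 3 ∨ (q ≠ 1 ∧ q ≠ 2 ∧ q ≠ 3) by omega with h | h | h | ⟨h1, h2, h3⟩
  · simp [h]; decide
  · simp [h]; decide
  · simp [h]; decide
  · rw [if_neg h3, if_neg h2, if_neg h1]
    simp [PySem.Dict.getD, PySem.Dict.ofList, PySem.Dict.update, PySem.Dict.insert,
      PySem.Dict.empty, PySem.Dict.get?, PySem.Dict.contains,
      show ((1:Int) = q) = False by simp; omega,
      show ((2:Int) = q) = False by simp; omega,
      show ((3:Int) = q) = False by simp; omega]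

-- ===== VERDICT (by name: the statement is the Claim_ definition above) =====
theorem suit_spec : Claim_equal_suit := by
  intro num _
  show suit num = suit_alt num
  unfold suit suit_alt
  rw [suitLoop_eq,
    PySem.Int.floordiv_eq_ediv_of_pos (by norm_num : (0:Int) < 13),
    dict_lookup_eq, zero_add]
  by_cases h13 : num ≤ 13
  · have hq : (num - 1) / 13 ≤ 0 := by omega
    rw [if_pos h13]
    rw [if_neg (show ¬ (num - 1) / 13 = 3 by omega),
        if_neg (show ¬ (num - 1) / 13 = 2 by omega),
        if_neg (show ¬ (num - 1) / 13 = 1 by omega)]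
    decide
  · rw [if_neg h13]
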